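-- pv_equiv track=rewrite | github.com/LiuHaoUltra/LyricsFlow-TypeF | app/services/lyrics_service.py | _simplify_artist
-- ===== SOURCE A (Python) =====
-- def _simplify_artist(artist: str) -> str:
--     if not artist: return ""
--     separators = ["&", ",", ";", " feat.", " ft.", " vs.", " x "]
--     cleaned = artist
--     for sep in separators:
--         if sep in cleaned:
--             cleaned = cleaned.split(sep)[0]
--     return cleaned.strip()
-- ===== SOURCE B (Python) =====
-- def _simplify_artist(artist: str) -> str:
--     def cut(s, seps):
--         if not seps:
--             return s
--         i = s.find(seps[0])
--         return cut(s if i == -1 else s[:i], seps[1:])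
--     if not artist:
--         return ""
--     return cut(artist, ("&", ",", ";", " feat.", " ft.", " vs.", " x ")).strip()
-- ===== Notes on version B (the rewrite author's own statement) =====
-- stated objective: alternative
-- what changed: Replaces the loop that tests membership and re-splits the string at each separator with a recursive cutter that finds each separator's first index once and truncates by a single slice, never building the split list.
import Mathlib
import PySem

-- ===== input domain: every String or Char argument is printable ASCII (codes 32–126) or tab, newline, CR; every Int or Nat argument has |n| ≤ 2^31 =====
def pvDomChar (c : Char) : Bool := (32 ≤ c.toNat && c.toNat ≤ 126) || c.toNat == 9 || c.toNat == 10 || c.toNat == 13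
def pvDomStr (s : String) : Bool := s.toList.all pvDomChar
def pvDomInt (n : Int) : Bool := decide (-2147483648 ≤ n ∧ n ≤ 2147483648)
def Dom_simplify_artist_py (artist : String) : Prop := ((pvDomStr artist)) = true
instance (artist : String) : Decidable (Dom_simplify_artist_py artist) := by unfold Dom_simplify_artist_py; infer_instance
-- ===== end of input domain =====

-- B replaces A's membership-test-then-split loop by a recursive cutter that finds each separator's first index and truncates with one slice (alternative decomposition, same cost).

-- ===== PORT A =====
-- literal port of A: for sep in separators: if sep in cleaned: cleaned = cleaned.split(sep)[0]; return cleaned.strip()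
def simplify_artist_py (artist : String) : String :=
  if artist.toList = [] then ""
  else
    let separators : List (List Char) :=
      ["&".toList, ",".toList, ";".toList, " feat.".toList, " ft.".toList, " vs.".toList, " x ".toList]
    let cleaned := separators.foldl
      (fun cleaned sep =>
        if PySem.Chars.isIn sep cleaned then (PySem.Chars.splitOn cleaned sep).headD []
        else cleaned) artist.toList
    String.ofList (PySem.Chars.strip cleaned)

-- ===== PORT B =====
-- literal port of B's recursive helper cut: i = s.find(seps[0]); recurse on (s if i == -1 else s[:i])
def pvCutB : List Char → List (List Char) → List Char
  | s, [] => s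
  | s, sep :: rest =>
      let i := PySem.Chars.find s sep
      pvCutB (if i = -1 then s else PySem.List.slice s none (some i)) rest

def simplify_artist_py_alt (artist : String) : String :=
  if artist.toList = [] then ""
  else
    String.ofList (PySem.Chars.strip (pvCutB artist.toList
      ["&".toList, ",".toList, ";".toList, " feat.".toList, " ft.".toList, " vs.".toList, " x ".toList]))

-- ===== PRECONDITION & SPEC =====
def Spec_simplify_artist_py (artist : String) (out : String) : Prop := out = simplify_artist_py_alt artist
instance (artist : String) (out : String) : Decidable (Spec_simplify_artist_py artist out) := by unfold Spec_simplify_artist_py; infer_instance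

-- ===== CLAIM (what is proved, stated in full; the proofs are below) =====
def Claim_equal_simplify_artist_py : Prop := ∀ (artist : String), Dom_simplify_artist_py artist → Spec_simplify_artist_py artist (simplify_artist_py artist)

-- ===== LEMMAS AND PROOFS =====

-- find.go at counter k, expressed through counter 0
lemma pv_find_go_shift (sub l : List Char) (k : Nat) :
    PySem.Chars.find.go sub l k =
      if PySem.Chars.find.go sub l 0 = -1 then -1 else (k : Int) + PySem.Chars.find.go sub l 0 := by
  induction l generalizing k with
  | nil =>
      simp only [PySem.Chars.find.go]
      split <;> simp
  | cons c rest ih =>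
      have hge : -1 ≤ PySem.Chars.find.go sub rest 0 := by
        have := PySem.Chars.neg_one_le_find rest sub
        simpa [PySem.Chars.find] using this
      simp only [PySem.Chars.find.go]
      split
      · simp
      · rw [ih (k+1), ih 1]
        split
        · simp
        · rw [if_neg (by omega)]
          push_cast; ring

-- head of splitOn.go with a nonempty accumulator is the last accumulated piece
lemma pv_splitOn_go_head_acc (sep : List Char) (fuel : Nat) :
    ∀ (l cur : List Char) (acc : List (List Char)) (x : List Char),
    (PySem.Chars.splitOn.go sep fuel l cur (acc ++ [x])).headD [] = x := by
  induction fuel with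
  | zero =>
      intro l cur acc x
      simp [PySem.Chars.splitOn.go]
  | succ n ih =>
      intro l cur acc x
      cases l with
      | nil => simp [PySem.Chars.splitOn.go]
      | cons c rest =>
          simp only [PySem.Chars.splitOn.go]
          split
          · have : cur.reverse :: (acc ++ [x]) = (cur.reverse :: acc) ++ [x] := by simp
            rw [this, ih]
          · exact ih rest (c :: cur) acc x

-- head of splitOn.go is the prefix before the first occurrence of sep (the whole string if absent)
lemma pv_splitOn_go_head (sep : List Char) (hsep : sep ≠ []) (fuel : Nat) :
    ∀ l cur : List Char, l.length < fuel →
    (PySem.Chars.splitOn.go sep fuel l cur []).headD [] =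
      cur.reverse ++ (if PySem.Chars.find l sep = -1 then l else l.take (PySem.Chars.find l sep).toNat) := by
  induction fuel with
  | zero => intro l cur h; omega
  | succ n ih =>
      intro l cur h
      cases l with
      | nil =>
          simp [PySem.Chars.splitOn.go, PySem.Chars.find, PySem.Chars.find.go,
                List.isEmpty_iff, hsep]
      | cons c rest =>
          simp only [PySem.Chars.splitOn.go]
          split
          · rename_i hpre
            rw [show (cur.reverse :: ([] : List (List Char))) = [] ++ [cur.reverse] by simp,
                pv_splitOn_go_head_acc]
            have hf : PySem.Chars.find (c :: rest) sep = 0 := by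
              simp [PySem.Chars.find, PySem.Chars.find.go, hpre]
            simp [hf]
          · rename_i hpre
            rw [ih rest (c :: cur) (by simpa using Nat.lt_of_succ_lt_succ h)]
            have hfind : PySem.Chars.find (c :: rest) sep =
                if PySem.Chars.find rest sep = -1 then -1 else 1 + PySem.Chars.find rest sep := by
              simp only [PySem.Chars.find, PySem.Chars.find.go, hpre]
              exact pv_find_go_shift sep rest 1
            have hge : -1 ≤ PySem.Chars.find rest sep := PySem.Chars.neg_one_le_find rest sep
            by_cases hr : PySem.Chars.find rest sep = -1
            · simp [hfind, hr]
            · rw [hfind, if_neg hr, if_neg (by omega), if_neg (by omega)]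
              have : ((1 : Int) + PySem.Chars.find rest sep).toNat =
                  (PySem.Chars.find rest sep).toNat + 1 := by omega
              simp [this, List.take_succ_cons]

-- A's loop body equals B's find-and-slice step, for a nonempty separator
lemma pv_step_eq (s sep : List Char) (hsep : sep ≠ []) :
    (if PySem.Chars.isIn sep s then (PySem.Chars.splitOn s sep).headD [] else s) =
      (if PySem.Chars.find s sep = -1 then s else PySem.List.slice s none (some (PySem.Chars.find s sep))) := by
  have hge := PySem.Chars.neg_one_le_find s sep
  by_cases hin : PySem.Chars.isIn sep s
  · have hinf : sep <:+: s := (PySem.Chars.isIn_iff_infix sep s).mp hin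
    have hne : PySem.Chars.find s sep ≠ -1 := by
      rw [Ne, PySem.Chars.find_eq_neg_one_iff]; exact not_not_intro hinf
    rw [if_pos hin, if_neg hne, PySem.List.slice_to s (by omega),
        PySem.Chars.splitOn, pv_splitOn_go_head sep hsep (s.length + 1) s [] (by omega),
        if_neg hne]
    simp
  · have hninf : ¬ sep <:+: s := by
      rw [← PySem.Chars.isIn_iff_infix]; simpa using hin
    have hneg : PySem.Chars.find s sep = -1 := (PySem.Chars.find_eq_neg_one_iff s sep).mpr hninf
    simp [hin, hneg]

-- A's fold over any list of nonempty separators equals B's recursive cutter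
lemma pv_fold_eq : ∀ (seps : List (List Char)) (s : List Char), (∀ sep ∈ seps, sep ≠ []) →
    seps.foldl (fun cleaned sep =>
      if PySem.Chars.isIn sep cleaned then (PySem.Chars.splitOn cleaned sep).headD []
      else cleaned) s = pvCutB s seps := by
  intro seps
  induction seps with
  | nil => intro s _; simp [pvCutB]
  | cons sep rest ih =>
      intro s h
      simp only [List.foldl_cons, pvCutB]
      rw [pv_step_eq s sep (h sep (by simp))]
      exact ih _ (fun x hx => h x (by simp [hx]))

-- ===== VERDICT (by name: the statement is the Claim_ definition above) =====
theorem simplify_artist_py_spec : Claim_equal_simplify_artist_py := by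
  intro artist _
  unfold Spec_simplify_artist_py simplify_artist_py simplify_artist_py_alt
  by_cases h : artist.toList = []
  · simp [h]
  · simp only [h]
    rw [pv_fold_eq _ _ (by decide)]
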